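-- pv_equiv track=rewrite | github.com/lemon4994/Tabletop-Sim-Digimon-Deck-Generator | main.py | filegenerator
-- ===== SOURCE A (Python) =====
-- eggs = ["-01","001","002","003","004","005","006"]
--
-- eggstras = ["BT1-007","BT1-008","BT2-007","EX2-007","BT13-007","P-148","P-149","P-157"]
--
-- eggceptions = ["EX1-001","EX1-002","EX1-003","EX1-004","EX1-005","EX1-006","EX3-003","EX3-004","EX3-005","EX3-006","EX4-005","EX4-006","LM-001","LM-002","LM-003","LM-004","LM-005","LM-006","RB1-004","RB1-005","RB1-006","P-001","P-002","P-003","P-004","P-005","P-006"]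
--
-- def filegenerator(decklist):
--     counter = 0 #number of cards in deck
--     contents = '{"ObjectStates":[{"Name":"Deck","Transform":{"posX":0,"posY":0,"posZ":0,"rotX":0,"rotY":180,"rotZ":180,"scaleX":2.35946536,"scaleY":1.0,"scaleZ":2.35946536},"Nickname":"Digimon Deck","DeckIDs":['
--     for card in decklist:
--         counter += 1
--         contents += f'{counter *100},'
--     contents = contents[:-1]
--     contents += '],"CustomDeck":{'
--
--     for i in range(counter):
--         if decklist[i][-3:] in eggs and decklist[i] not in eggceptions:
--             cardBack = "https://file.garden/ZUWEKmrAFHgJ5X5e/DigimonBackEgg.jpg"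
--         elif decklist[i] in eggstras:
--             cardBack = "https://file.garden/ZUWEKmrAFHgJ5X5e/DigimonBackEgg.jpg"
--         else:
--             cardBack = "https://file.garden/ZUWEKmrAFHgJ5X5e/DigimonBack.jpg"
--         contents += f'"{i+1}":{{"FaceURL":"https://world.digimoncard.com/images/cardlist/card/{decklist[i]}.png","BackURL":"{cardBack}","NumHeight":1,"NumWidth":1,"BackIsHidden":true}},'
--
--     contents = contents[:-1]
--     contents += '},"ContainedObjects":['
--     for i in range(counter):
--         if decklist[i][-3:] in eggs and decklist[i] not in eggceptions:
--             cardBack = "https://file.garden/ZUWEKmrAFHgJ5X5e/DigimonBackEgg.jpg"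
--         elif decklist[i] in eggstras:
--             cardBack = "https://file.garden/ZUWEKmrAFHgJ5X5e/DigimonBackEgg.jpg"
--         else:
--             cardBack = "https://file.garden/ZUWEKmrAFHgJ5X5e/DigimonBack.jpg"
--         contents += f'{{"Name":"CardCustom","Transform":{{"posX":0,"posY":0,"posZ":0,"rotX":0,"rotY":180,"rotZ":180,"scaleX":2.35946536,"scaleY":1.0,"scaleZ":2.35946536}},"Nickname":"{decklist[i]}", "CardID":{(i+1)*100},"CustomDeck":{{"{i+1}":{{"FaceURL":"https://world.digimoncard.com/images/cardlist/card/{decklist[i]}.png","BackURL":"{cardBack}","NumHeight":1,"NumWidth":1,"BackIsHidden":true}}}}}},'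
--
--     contents = contents[:-1]
--     contents += ']}]}'
--     return contents
-- ===== SOURCE B (Python) =====
-- eggs = ["-01","001","002","003","004","005","006"]
--
-- eggstras = ["BT1-007","BT1-008","BT2-007","EX2-007","BT13-007","P-148","P-149","P-157"]
--
-- eggceptions = ["EX1-001","EX1-002","EX1-003","EX1-004","EX1-005","EX1-006","EX3-003","EX3-004","EX3-005","EX3-006","EX4-005","EX4-006","LM-001","LM-002","LM-003","LM-004","LM-005","LM-006","RB1-004","RB1-005","RB1-006","P-001","P-002","P-003","P-004","P-005","P-006"]
--
-- EGG_BACK = "https://file.garden/ZUWEKmrAFHgJ5X5e/DigimonBackEgg.jpg"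
-- PLAIN_BACK = "https://file.garden/ZUWEKmrAFHgJ5X5e/DigimonBack.jpg"
--
--
-- def filegenerator(decklist):
--     # single fused pass: each card contributes one entry to each of the three
--     # sections, which are assembled once at the end
--     ids, custom, contained = [], [], []
--     for i, card in enumerate(decklist, 1):
--         if (card[-3:] in eggs and card not in eggceptions) or card in eggstras:
--             back = EGG_BACK
--         else:
--             back = PLAIN_BACK
--         ids.append(f'{i * 100}')
--         custom.append(f'"{i}":{{"FaceURL":"https://world.digimoncard.com/images/cardlist/card/{card}.png","BackURL":"{back}","NumHeight":1,"NumWidth":1,"BackIsHidden":true}}')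
--         contained.append(f'{{"Name":"CardCustom","Transform":{{"posX":0,"posY":0,"posZ":0,"rotX":0,"rotY":180,"rotZ":180,"scaleX":2.35946536,"scaleY":1.0,"scaleZ":2.35946536}},"Nickname":"{card}", "CardID":{i * 100},"CustomDeck":{{"{i}":{{"FaceURL":"https://world.digimoncard.com/images/cardlist/card/{card}.png","BackURL":"{back}","NumHeight":1,"NumWidth":1,"BackIsHidden":true}}}}}}')
--     return ('{"ObjectStates":[{"Name":"Deck","Transform":{"posX":0,"posY":0,"posZ":0,"rotX":0,"rotY":180,"rotZ":180,"scaleX":2.35946536,"scaleY":1.0,"scaleZ":2.35946536},"Nickname":"Digimon Deck","DeckIDs":['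
--             + ",".join(ids) + '],"CustomDeck":{' + ",".join(custom)
--             + '},"ContainedObjects":[' + ",".join(contained) + ']}]}')
-- ===== Notes on version B (the rewrite author's own statement) =====
-- stated objective: alternative
-- what changed: B replaces A's three staged counter/range loops (each appending with += and then slicing off the trailing comma via contents[:-1]) by one fused enumerate pass that classifies each card once and pushes its entry into three section lists, which are assembled with ','.join at the end.
-- intended difference: On the empty decklist A's three contents[:-1] strips delete the opening bracket/brace of each empty section and return malformed JSON, while B returns the well-formed document with empty DeckIDs/CustomDeck/ContainedObjects sections, which is the intended output. — e.g. on filegenerator([]): A returns "{\"ObjectStates\":[{\"Name\":\"Deck\",\"Transform\":{\"posX\":0,\"posY\":0,\"posZ\":0,\"rotX\":0,\"rotY\":180,\"rotZ\"…, B returns "{\"ObjectStates\":[{\"Name\":\"Deck\",\"Transform\":{\"posX\":0,\"posY\":0,\"posZ\":0,\"rotX\":0,\"rotY\":180,\"rotZ\"…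
import Mathlib
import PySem

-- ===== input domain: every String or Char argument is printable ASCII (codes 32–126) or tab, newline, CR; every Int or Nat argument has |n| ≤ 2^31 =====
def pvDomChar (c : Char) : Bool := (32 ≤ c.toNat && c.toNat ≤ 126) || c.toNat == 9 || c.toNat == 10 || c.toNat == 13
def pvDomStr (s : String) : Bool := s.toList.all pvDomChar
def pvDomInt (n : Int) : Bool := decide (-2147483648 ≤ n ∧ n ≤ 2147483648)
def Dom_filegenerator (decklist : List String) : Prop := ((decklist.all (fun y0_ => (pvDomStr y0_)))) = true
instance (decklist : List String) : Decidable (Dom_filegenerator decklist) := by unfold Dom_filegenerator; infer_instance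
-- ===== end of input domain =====

-- B replaces A's three staged append-then-strip loops by ONE fused enumerate pass that classifies each
-- card once and pushes its entry into three section lists, joined at the end (objective: alternative);
-- on the empty decklist A's contents[:-1] strips real brackets, B emits well-formed empty sections (D_).

-- Shared module constants of Source A / Source B
def pvEggs : List String := ["-01", "001", "002", "003", "004", "005", "006"]
def pvEggstras : List String := ["BT1-007", "BT1-008", "BT2-007", "EX2-007", "BT13-007", "P-148", "P-149", "P-157"]
def pvEggceptions : List String := ["EX1-001", "EX1-002", "EX1-003", "EX1-004", "EX1-005", "EX1-006", "EX3-003", "EX3-004", "EX3-005", "EX3-006", "EX4-005", "EX4-006", "LM-001", "LM-002", "LM-003", "LM-004", "LM-005", "LM-006", "RB1-004", "RB1-005", "RB1-006", "P-001", "P-002", "P-003", "P-004", "P-005", "P-006"]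
def pvEggBack : String := "https://file.garden/ZUWEKmrAFHgJ5X5e/DigimonBackEgg.jpg"
def pvPlainBack : String := "https://file.garden/ZUWEKmrAFHgJ5X5e/DigimonBack.jpg"
def pvHead : String := "{\"ObjectStates\":[{\"Name\":\"Deck\",\"Transform\":{\"posX\":0,\"posY\":0,\"posZ\":0,\"rotX\":0,\"rotY\":180,\"rotZ\":180,\"scaleX\":2.35946536,\"scaleY\":1.0,\"scaleZ\":2.35946536},\"Nickname\":\"Digimon Deck\",\"DeckIDs\":["

-- ===== PORT A =====
-- literal transliteration of Source A's filegenerator; decklist[i] with 0 ≤ i < len(decklist) is exact as pyGetD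
def filegenerator (decklist : List String) : String :=
  let st := decklist.foldl (fun (st : Int × String) _card =>
      let counter := st.1 + 1
      (counter, st.2 ++ PySem.Int.toStr (counter * 100) ++ ",")) (0, pvHead)
  let counter := st.1
  let contents := PySem.Str.slice st.2 none (some (-1))
  let contents := contents ++ "],\"CustomDeck\":{"
  let contents := (PySem.List.pyRange 0 counter).foldl (fun contents i =>
      let card := PySem.List.pyGetD decklist i ""
      let cardBack := if pvEggs.contains (PySem.Str.slice card (some (-3)) none) && !(pvEggceptions.contains card) then pvEggBack
        else if pvEggstras.contains card then pvEggBack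
        else pvPlainBack
      contents ++ "\"" ++ PySem.Int.toStr (i + 1) ++ "\":{\"FaceURL\":\"https://world.digimoncard.com/images/cardlist/card/" ++ card ++ ".png\",\"BackURL\":\"" ++ cardBack ++ "\",\"NumHeight\":1,\"NumWidth\":1,\"BackIsHidden\":true},") contents
  let contents := PySem.Str.slice contents none (some (-1))
  let contents := contents ++ "},\"ContainedObjects\":["
  let contents := (PySem.List.pyRange 0 counter).foldl (fun contents i =>
      let card := PySem.List.pyGetD decklist i ""
      let cardBack := if pvEggs.contains (PySem.Str.slice card (some (-3)) none) && !(pvEggceptions.contains card) then pvEggBack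
        else if pvEggstras.contains card then pvEggBack
        else pvPlainBack
      contents ++ "{\"Name\":\"CardCustom\",\"Transform\":{\"posX\":0,\"posY\":0,\"posZ\":0,\"rotX\":0,\"rotY\":180,\"rotZ\":180,\"scaleX\":2.35946536,\"scaleY\":1.0,\"scaleZ\":2.35946536},\"Nickname\":\"" ++ card ++ "\", \"CardID\":" ++ PySem.Int.toStr ((i + 1) * 100) ++ ",\"CustomDeck\":{\"" ++ PySem.Int.toStr (i + 1) ++ "\":{\"FaceURL\":\"https://world.digimoncard.com/images/cardlist/card/" ++ card ++ ".png\",\"BackURL\":\"" ++ cardBack ++ "\",\"NumHeight\":1,\"NumWidth\":1,\"BackIsHidden\":true}}},") contents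
  let contents := PySem.Str.slice contents none (some (-1))
  contents ++ "]}]}"

-- ===== PORT B =====
-- pvBack is Source B's combined single if-condition for the card back
def pvBack (card : String) : String :=
  if (pvEggs.contains (PySem.Str.slice card (some (-3)) none) && !(pvEggceptions.contains card)) || pvEggstras.contains card then pvEggBack
  else pvPlainBack

def pvCustomEntry (ix : Int) (card back : String) : String :=
  "\"" ++ PySem.Int.toStr ix ++ "\":{\"FaceURL\":\"https://world.digimoncard.com/images/cardlist/card/" ++ card ++ ".png\",\"BackURL\":\"" ++ back ++ "\",\"NumHeight\":1,\"NumWidth\":1,\"BackIsHidden\":true}"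

def pvContainedEntry (ix : Int) (card back : String) : String :=
  "{\"Name\":\"CardCustom\",\"Transform\":{\"posX\":0,\"posY\":0,\"posZ\":0,\"rotX\":0,\"rotY\":180,\"rotZ\":180,\"scaleX\":2.35946536,\"scaleY\":1.0,\"scaleZ\":2.35946536},\"Nickname\":\"" ++ card ++ "\", \"CardID\":" ++ PySem.Int.toStr (ix * 100) ++ ",\"CustomDeck\":{\"" ++ PySem.Int.toStr ix ++ "\":{\"FaceURL\":\"https://world.digimoncard.com/images/cardlist/card/" ++ card ++ ".png\",\"BackURL\":\"" ++ back ++ "\",\"NumHeight\":1,\"NumWidth\":1,\"BackIsHidden\":true}}}"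

-- Source B's single for-loop over enumerate(decklist, 1) with three list accumulators
def filegenerator_alt (decklist : List String) : String :=
  let st := (PySem.List.enumerate decklist 1).foldl
    (fun (st : List String × List String × List String) p =>
      let i := p.1
      let card := p.2
      let back := pvBack card
      (st.1 ++ [PySem.Int.toStr (i * 100)],
       st.2.1 ++ [pvCustomEntry i card back],
       st.2.2 ++ [pvContainedEntry i card back]))
    ([], [], [])
  pvHead ++ PySem.Str.join "," st.1 ++ "],\"CustomDeck\":{" ++ PySem.Str.join "," st.2.1
    ++ "},\"ContainedObjects\":[" ++ PySem.Str.join "," st.2.2 ++ "]}]}"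

-- ===== PRECONDITION & SPEC =====
-- On the empty decklist A's three contents[:-1] strips delete the opening bracket/brace of each empty
-- section and return malformed JSON; B returns the well-formed document with empty sections, which is
-- the intended output.
def D_filegenerator (decklist : List String) : Prop := decklist = []
instance (decklist : List String) : Decidable (D_filegenerator decklist) := by unfold D_filegenerator; infer_instance

def Spec_filegenerator (decklist : List String) (out : String) : Prop := ¬ D_filegenerator decklist → out = filegenerator_alt decklist
instance (decklist : List String) (out : String) : Decidable (Spec_filegenerator decklist out) := by unfold Spec_filegenerator; infer_instance

def pvDiffWitness_filegenerator : List String := []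
def pvDiffWitnessOut_filegenerator : String × String := ("{\"ObjectStates\":[{\"Name\":\"Deck\",\"Transform\":{\"posX\":0,\"posY\":0,\"posZ\":0,\"rotX\":0,\"rotY\":180,\"rotZ\":180,\"scaleX\":2.35946536,\"scaleY\":1.0,\"scaleZ\":2.35946536},\"Nickname\":\"Digimon Deck\",\"DeckIDs\":],\"CustomDeck\":},\"ContainedObjects\":]}]}", "{\"ObjectStates\":[{\"Name\":\"Deck\",\"Transform\":{\"posX\":0,\"posY\":0,\"posZ\":0,\"rotX\":0,\"rotY\":180,\"rotZ\":180,\"scaleX\":2.35946536,\"scaleY\":1.0,\"scaleZ\":2.35946536},\"Nickname\":\"Digimon Deck\",\"DeckIDs\":[],\"CustomDeck\":{},\"ContainedObjects\":[]}]}")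

-- ===== CLAIM (what is proved, stated in full; the proofs are below) =====
def Claim_unchanged_filegenerator : Prop := ∀ (decklist : List String), Dom_filegenerator decklist → Spec_filegenerator decklist (filegenerator decklist)
def Claim_changed_filegenerator : Prop := Dom_filegenerator (pvDiffWitness_filegenerator) ∧ D_filegenerator (pvDiffWitness_filegenerator) ∧ filegenerator (pvDiffWitness_filegenerator) = pvDiffWitnessOut_filegenerator.1 ∧ filegenerator_alt (pvDiffWitness_filegenerator) = pvDiffWitnessOut_filegenerator.2 ∧ pvDiffWitnessOut_filegenerator.1 ≠ pvDiffWitnessOut_filegenerator.2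
def Claim_exact_filegenerator : Prop := ∀ (decklist : List String), Dom_filegenerator decklist → D_filegenerator decklist → filegenerator decklist ≠ filegenerator_alt decklist

-- ===== LEMMAS AND PROOFS =====

-- ---- generic helper lemmas (proofs only) ----

theorem pv_foldl_str {α : Type} (f : String → α → String) (g : α → String)
    (h : ∀ acc x, f acc x = acc ++ g x) :
    ∀ (l : List α) (init : String),
      (l.foldl f init).toList = init.toList ++ l.flatMap (fun x => (g x).toList) := by
  intro l
  induction l with
  | nil => intro init; simp
  | cons x xs ih =>
    intro init
    simp only [List.foldl_cons, h, List.flatMap_cons, ih, String.toList_append, List.append_assoc]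

theorem pv_loopA (n : Nat) (g : Int → String) (f : String → Int → String)
    (hf : ∀ acc i, f acc i = acc ++ g i) (init : String) :
    ((PySem.List.pyRange 0 (n : Int)).foldl f init).toList
      = init.toList ++ ((List.range n).map (fun k : Nat => (g (k : Int)).toList)).flatten := by
  rw [pv_foldl_str f g hf, PySem.List.pyRange_zero_natCast, List.flatMap_map, List.flatMap_def]

theorem pv_strip_join (parts : List (List Char)) (h : parts ≠ []) :
    ((parts.map (fun p => p ++ [','])).flatten).dropLast = PySem.Chars.join [','] parts := by
  induction parts with
  | nil => exact absurd rfl h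
  | cons p rest ih =>
    cases rest with
    | nil => simp [PySem.Chars.join_singleton]
    | cons q rest' =>
      rw [PySem.Chars.join_cons_cons]
      have hne : ((List.map (fun p => p ++ [',']) (q :: rest')).flatten) ≠ [] := by
        simp
      rw [List.map_cons, List.flatten_cons]
      rw [List.dropLast_append_of_ne_nil hne, ih (by simp)]

theorem pv_stripSec (s : List Char) (parts : List (List Char)) (h : parts ≠ []) :
    (s ++ (parts.map (fun p => p ++ [','])).flatten).dropLast
      = s ++ PySem.Chars.join [','] parts := by
  have hne : (parts.map (fun p => p ++ [','])).flatten ≠ [] := by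
    cases parts with
    | nil => exact absurd rfl h
    | cons p rest => simp
  rw [List.dropLast_append_of_ne_nil hne, pv_strip_join parts h]

-- A's inline if/elif card-back chain computes B's single combined condition pvBack
theorem pv_back_eq (card : String) :
    (if pvEggs.contains (PySem.Str.slice card (some (-3)) none) && !(pvEggceptions.contains card) then pvEggBack
     else if pvEggstras.contains card then pvEggBack
     else pvPlainBack) = pvBack card := by
  by_cases he : PySem.Str.slice card (some (-3)) none ∈ pvEggs <;>
    by_cases hc : card ∈ pvEggceptions <;>
      by_cases hs : card ∈ pvEggstras <;>
        simp [pvBack, he, hc, hs]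

-- B's fused triple-accumulator fold, split into three maps
theorem pv_fold3 :
    ∀ (l : List (Int × String)) (a b c : List String),
      l.foldl (fun (st : List String × List String × List String) p =>
        (st.1 ++ [PySem.Int.toStr (p.1 * 100)],
         st.2.1 ++ [pvCustomEntry p.1 p.2 (pvBack p.2)],
         st.2.2 ++ [pvContainedEntry p.1 p.2 (pvBack p.2)])) (a, b, c)
      = (a ++ l.map (fun p => PySem.Int.toStr (p.1 * 100)),
         b ++ l.map (fun p => pvCustomEntry p.1 p.2 (pvBack p.2)),
         c ++ l.map (fun p => pvContainedEntry p.1 p.2 (pvBack p.2))) := by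
  intro l
  induction l with
  | nil => intro a b c; simp
  | cons x xs ih =>
    intro a b c
    rw [List.foldl_cons, ih]
    simp

-- a map over enumerate(dl, s), as a map over indices
theorem pv_enum_map {α : Type} (g : Int → String → α) :
    ∀ (dl : List String) (s : Int),
      (PySem.List.enumerate dl s).map (fun p => g p.1 p.2)
        = (List.range dl.length).map (fun k : Nat => g (s + (k : Int)) (dl.getD k "")) := by
  intro dl
  induction dl with
  | nil => intro s; simp [PySem.List.enumerate_nil]
  | cons x xs ih =>
    intro s
    rw [PySem.List.enumerate_cons, List.map_cons, ih (s + 1)]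
    simp only [List.length_cons, List.range_succ_eq_map, List.map_cons, List.map_map]
    refine congrArg₂ List.cons (by simp) ?_
    apply List.map_congr_left
    intro a _
    have harg : s + 1 + (a : Int) = s + ((a + 1 : Nat) : Int) := by push_cast; ring
    simp [Function.comp, harg]

theorem pv_loop1 (l : List String) : ∀ (c : Int) (s : String),
    l.foldl (fun (st : Int × String) _card =>
        (st.1 + 1, st.2 ++ PySem.Int.toStr ((st.1 + 1) * 100) ++ ",")) (c, s)
      = (c + l.length,
         String.ofList (s.toList ++
           (((List.range l.length).map (fun k : Nat => (PySem.Int.toStr ((c + (k : Int) + 1) * 100)).toList)).map (fun p => p ++ [','])).flatten)) := by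
  induction l with
  | nil => intro c s; simp
  | cons x xs ih =>
    intro c s
    rw [List.foldl_cons, ih]
    refine Prod.ext ?_ ?_
    · simp; omega
    · simp only []
      apply congrArg String.ofList
      simp only [List.length_cons]
      rw [List.range_succ_eq_map]
      simp only [List.map_cons, List.map_map, List.flatten_cons, String.toList_append,
        Nat.cast_zero, add_zero, List.append_assoc]
      refine congrArg (fun t => s.toList ++ ((PySem.Int.toStr ((c + 1) * 100)).toList ++ ([','] ++ t))) ?_
      apply congrArg List.flatten
      apply List.map_congr_left
      intro a _
      have harg : c + 1 + (a : Int) + 1 = c + ((a + 1 : Nat) : Int) + 1 := by push_cast; ring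
      simp only [Function.comp_apply, Nat.succ_eq_add_one, harg]

theorem pv_loop2 (dl : List String) (init : String) :
    ((PySem.List.pyRange 0 ((dl.length : Int))).foldl (fun contents i =>
        contents ++ "\"" ++ PySem.Int.toStr (i + 1) ++ "\":{\"FaceURL\":\"https://world.digimoncard.com/images/cardlist/card/" ++ PySem.List.pyGetD dl i "" ++ ".png\",\"BackURL\":\"" ++ (if pvEggs.contains (PySem.Str.slice (PySem.List.pyGetD dl i "") (some (-3)) none) && !(pvEggceptions.contains (PySem.List.pyGetD dl i "")) then pvEggBack
        else if pvEggstras.contains (PySem.List.pyGetD dl i "") then pvEggBack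
        else pvPlainBack) ++ "\",\"NumHeight\":1,\"NumWidth\":1,\"BackIsHidden\":true},") init).toList
      = init.toList ++ (((List.range dl.length).map (fun k : Nat =>
          (pvCustomEntry ((k : Int) + 1) (dl.getD k "") (pvBack (dl.getD k ""))).toList)).map (fun p => p ++ [','])).flatten := by
  refine Eq.trans (pv_loopA dl.length (fun i => "\"" ++ PySem.Int.toStr (i + 1) ++ "\":{\"FaceURL\":\"https://world.digimoncard.com/images/cardlist/card/" ++ PySem.List.pyGetD dl i "" ++ ".png\",\"BackURL\":\"" ++ (if pvEggs.contains (PySem.Str.slice (PySem.List.pyGetD dl i "") (some (-3)) none) && !(pvEggceptions.contains (PySem.List.pyGetD dl i "")) then pvEggBack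
        else if pvEggstras.contains (PySem.List.pyGetD dl i "") then pvEggBack
        else pvPlainBack) ++ "\",\"NumHeight\":1,\"NumWidth\":1,\"BackIsHidden\":true},") _ ?_ init) ?_
  · intro acc i
    apply String.ext
    simp only [String.toList_append, List.append_assoc]
  refine congrArg (fun t => init.toList ++ t) ?_
  rw [List.map_map]
  apply congrArg List.flatten
  apply List.map_congr_left
  intro k _
  have hE : ("\",\"NumHeight\":1,\"NumWidth\":1,\"BackIsHidden\":true}," : String).toList = ("\",\"NumHeight\":1,\"NumWidth\":1,\"BackIsHidden\":true}" : String).toList ++ [','] := rfl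
  simp only [Function.comp_apply, PySem.List.pyGetD_natCast, pv_back_eq, pvCustomEntry,
    String.toList_append, hE, List.append_assoc]

theorem pv_loop3 (dl : List String) (init : String) :
    ((PySem.List.pyRange 0 ((dl.length : Int))).foldl (fun contents i =>
        contents ++ "{\"Name\":\"CardCustom\",\"Transform\":{\"posX\":0,\"posY\":0,\"posZ\":0,\"rotX\":0,\"rotY\":180,\"rotZ\":180,\"scaleX\":2.35946536,\"scaleY\":1.0,\"scaleZ\":2.35946536},\"Nickname\":\"" ++ PySem.List.pyGetD dl i "" ++ "\", \"CardID\":" ++ PySem.Int.toStr ((i + 1) * 100) ++ ",\"CustomDeck\":{\"" ++ PySem.Int.toStr (i + 1) ++ "\":{\"FaceURL\":\"https://world.digimoncard.com/images/cardlist/card/" ++ PySem.List.pyGetD dl i "" ++ ".png\",\"BackURL\":\"" ++ (if pvEggs.contains (PySem.Str.slice (PySem.List.pyGetD dl i "") (some (-3)) none) && !(pvEggceptions.contains (PySem.List.pyGetD dl i "")) then pvEggBack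
        else if pvEggstras.contains (PySem.List.pyGetD dl i "") then pvEggBack
        else pvPlainBack) ++ "\",\"NumHeight\":1,\"NumWidth\":1,\"BackIsHidden\":true}}},") init).toList
      = init.toList ++ (((List.range dl.length).map (fun k : Nat =>
          (pvContainedEntry ((k : Int) + 1) (dl.getD k "") (pvBack (dl.getD k ""))).toList)).map (fun p => p ++ [','])).flatten := by
  refine Eq.trans (pv_loopA dl.length (fun i => "{\"Name\":\"CardCustom\",\"Transform\":{\"posX\":0,\"posY\":0,\"posZ\":0,\"rotX\":0,\"rotY\":180,\"rotZ\":180,\"scaleX\":2.35946536,\"scaleY\":1.0,\"scaleZ\":2.35946536},\"Nickname\":\"" ++ PySem.List.pyGetD dl i "" ++ "\", \"CardID\":" ++ PySem.Int.toStr ((i + 1) * 100) ++ ",\"CustomDeck\":{\"" ++ PySem.Int.toStr (i + 1) ++ "\":{\"FaceURL\":\"https://world.digimoncard.com/images/cardlist/card/" ++ PySem.List.pyGetD dl i "" ++ ".png\",\"BackURL\":\"" ++ (if pvEggs.contains (PySem.Str.slice (PySem.List.pyGetD dl i "") (some (-3)) none) && !(pvEggceptions.contains (PySem.List.pyGetD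 dl i "")) then pvEggBack
        else if pvEggstras.contains (PySem.List.pyGetD dl i "") then pvEggBack
        else pvPlainBack) ++ "\",\"NumHeight\":1,\"NumWidth\":1,\"BackIsHidden\":true}}},") _ ?_ init) ?_
  · intro acc i
    apply String.ext
    simp only [String.toList_append, List.append_assoc]
  refine congrArg (fun t => init.toList ++ t) ?_
  rw [List.map_map]
  apply congrArg List.flatten
  apply List.map_congr_left
  intro k _
  have hE : ("\",\"NumHeight\":1,\"NumWidth\":1,\"BackIsHidden\":true}}}," : String).toList = ("\",\"NumHeight\":1,\"NumWidth\":1,\"BackIsHidden\":true}}}" : String).toList ++ [','] := rfl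
  simp only [Function.comp_apply, PySem.List.pyGetD_natCast, pv_back_eq, pvContainedEntry,
    String.toList_append, hE, List.append_assoc]

theorem pv_main : Claim_unchanged_filegenerator := by
  intro dl _dom hD
  unfold D_filegenerator at hD
  have hn : dl.length ≠ 0 := fun h => hD (List.length_eq_zero_iff.mp h)
  simp only [filegenerator, filegenerator_alt]
  rw [pv_fold3]
  simp only [List.nil_append]
  have h1 := pv_enum_map (fun i _card => PySem.Int.toStr (i * 100)) dl 1
  have h2 := pv_enum_map (fun i card => pvCustomEntry i card (pvBack card)) dl 1
  have h3 := pv_enum_map (fun i card => pvContainedEntry i card (pvBack card)) dl 1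
  beta_reduce at h1 h2 h3
  rw [h1, h2, h3]
  rw [pv_loop1]
  simp only [zero_add]
  apply String.ext
  simp only [String.toList_append, PySem.Str.slice_to_neg_one]
  rw [pv_loop3]
  simp only [String.toList_append, PySem.Str.slice_to_neg_one]
  rw [pv_loop2]
  have hnil : ∀ (e : Nat → List Char), (List.range dl.length).map e ≠ [] := by
    intro e h
    rw [List.map_eq_nil_iff] at h
    exact hn (by simpa using congrArg List.length h)
  rw [pv_stripSec _ _ (hnil _), pv_stripSec _ _ (hnil _)]
  simp only [String.toList_append, PySem.Str.slice_to_neg_one, String.toList_ofList]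
  rw [pv_stripSec _ _ (hnil _)]
  simp only [PySem.Str.toList_join, List.map_map, Function.comp_def]
  have hc : (",").toList = [','] := rfl
  rw [hc]
  have harg : ∀ k : Nat, (1 : Int) + (k : Int) = (k : Int) + 1 := fun k => by ring
  simp only [harg]

-- ===== VERDICT (by name: the statement is the Claim_ definition above) =====
theorem filegenerator_spec : Claim_unchanged_filegenerator := pv_main

set_option maxRecDepth 100000 in
theorem filegenerator_changed : Claim_changed_filegenerator := by
  unfold Claim_changed_filegenerator
  refine ⟨by decide, by decide, by decide, by decide, by decide⟩

set_option maxRecDepth 100000 in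
theorem filegenerator_tight : Claim_exact_filegenerator := by
  intro decklist _ hD
  unfold D_filegenerator at hD
  subst hD
  decide
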